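-- pv_equiv track=rewrite | github.com/sarka-stepankova/NPRG030-zp | main.py | mergeNoodle
-- ===== SOURCE A (Python) =====
-- def mergeNoodle(n1,n2,n3,n4):
--     '''
--     Function that takes 4 numbers from one row/col and does a slide to n1 (with merging).
--     '''
--
--     # slide to n1 without merging (firstly I need nonzero numbers as close as possible to n1)
--     noodle = [n1, n2, n3, n4]
--     newNoodle = []
--     counter = 4
--     for num in noodle:
--         if num != 0:
--             newNoodle.append(num)
--             counter -= 1
--     nulls = [0] * counter
--     noodle = newNoodle + nulls
--
--     # now merging nonzero numbers (from n1)
--     if noodle[0] == noodle[1]: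
--         noodle[0] *= 2
--         noodle[1] = 0
--     if noodle[1] == noodle[2]:
--         noodle[1] *= 2
--         noodle[2] = 0
--     if noodle[2] == noodle[3]:
--         noodle[2] *= 2
--         noodle[3] = 0
--
--     # another slide to n1 (zeros may occur after merge between nonzero nums)
--     newNoodle = []
--     counter = 4
--     for num in noodle:
--         if num != 0:
--             newNoodle.append(num)
--             counter -= 1
--     nulls = [0] * counter
--
--     return newNoodle + nulls
-- ===== SOURCE B (Python) =====
-- def mergeNoodle(n1, n2, n3, n4):
--     '''
--     Function that takes 4 numbers from one row/col and does a slide to n1 (with merging).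
--     '''
--     tiles = [n for n in (n1, n2, n3, n4) if n != 0]
--     out = []
--     i = 0
--     while i < len(tiles):
--         if i + 1 < len(tiles) and tiles[i] == tiles[i + 1]:
--             out.append(tiles[i] * 2)
--             i += 2
--         else:
--             out.append(tiles[i])
--             i += 1
--     return out + [0] * (4 - len(out))
-- ===== Notes on version B (the rewrite author's own statement) =====
-- stated objective: simpler
-- what changed: Replaces A's compact / three hardcoded positional if-merges / second compaction with one compaction plus a single left-to-right merge pass over the nonzero tiles (skipping the consumed neighbour), then zero-padding to 4.
import Mathlib
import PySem

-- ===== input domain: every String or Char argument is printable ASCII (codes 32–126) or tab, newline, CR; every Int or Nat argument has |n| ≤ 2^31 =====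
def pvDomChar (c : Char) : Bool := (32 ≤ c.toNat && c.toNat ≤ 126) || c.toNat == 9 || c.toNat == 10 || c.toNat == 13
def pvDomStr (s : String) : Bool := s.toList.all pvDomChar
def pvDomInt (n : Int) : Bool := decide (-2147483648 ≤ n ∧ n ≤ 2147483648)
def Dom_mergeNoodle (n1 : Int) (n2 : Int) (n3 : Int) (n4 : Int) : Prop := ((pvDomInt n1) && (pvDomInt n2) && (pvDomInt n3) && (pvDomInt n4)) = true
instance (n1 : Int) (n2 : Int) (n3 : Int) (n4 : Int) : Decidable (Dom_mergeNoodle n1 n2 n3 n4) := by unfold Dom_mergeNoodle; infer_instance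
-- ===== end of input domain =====

-- B replaces A\'s compact + three hardcoded positional if-merges + re-compaction with one
-- compaction and a single merge pass (objective: simpler); return values proved equal on Dom.
-- ===== PORT A =====
-- slide pass of A: keep nonzero tiles in order, pad with counter zeros (counter = 4 - #kept)
def pvCompactA (xs : List Int) : List Int :=
  let newNoodle := xs.foldl (fun acc num => if num ≠ 0 then acc ++ [num] else acc) []
  newNoodle ++ List.replicate (4 - newNoodle.length) 0

-- A's three in-place positional merges on the 4-slot noodle (always length 4 here;
-- the catch-all branch only totalises the match and is never reached)
def pvMergeStepsA (noodle : List Int) : List Int :=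
  match noodle with
  | [a0, a1, a2, a3] =>
    let p01 := if a0 = a1 then (a0 * 2, 0) else (a0, a1)
    let p12 := if p01.2 = a2 then (p01.2 * 2, 0) else (p01.2, a2)
    let p23 := if p12.2 = a3 then (p12.2 * 2, 0) else (p12.2, a3)
    [p01.1, p12.1, p23.1, p23.2]
  | other => other

def mergeNoodle (n1 : Int) (n2 : Int) (n3 : Int) (n4 : Int) : List Int :=
  pvCompactA (pvMergeStepsA (pvCompactA [n1, n2, n3, n4]))

-- ===== PORT B =====
-- B's single merge pass: equal adjacent tiles merge and the neighbour is consumed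
def pvMergePassB : List Int → List Int
  | [] => []
  | [x] => [x]
  | x :: y :: rest =>
    if x = y then x * 2 :: pvMergePassB rest else x :: pvMergePassB (y :: rest)

def mergeNoodle_alt (n1 : Int) (n2 : Int) (n3 : Int) (n4 : Int) : List Int :=
  let tiles := [n1, n2, n3, n4].filter (fun n => n ≠ 0)
  let out := pvMergePassB tiles
  out ++ List.replicate (4 - out.length) 0

-- ===== PRECONDITION & SPEC =====
def Spec_mergeNoodle (n1 : Int) (n2 : Int) (n3 : Int) (n4 : Int) (out : List Int) : Prop := out = mergeNoodle_alt n1 n2 n3 n4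
instance (n1 : Int) (n2 : Int) (n3 : Int) (n4 : Int) (out : List Int) : Decidable (Spec_mergeNoodle n1 n2 n3 n4 out) := by unfold Spec_mergeNoodle; infer_instance

-- ===== CLAIM (what is proved, stated in full; the proofs are below) =====
def Claim_equal_mergeNoodle : Prop := ∀ (n1 : Int) (n2 : Int) (n3 : Int) (n4 : Int), Dom_mergeNoodle n1 n2 n3 n4 → Spec_mergeNoodle n1 n2 n3 n4 (mergeNoodle n1 n2 n3 n4)

-- ===== LEMMAS AND PROOFS =====

-- A's first slide loop builds exactly the nonzero filter
theorem pvFoldFilter (xs : List Int) (acc : List Int) :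
    xs.foldl (fun acc num => if num ≠ 0 then acc ++ [num] else acc) acc
      = acc ++ xs.filter (fun n => n ≠ 0) := by
  induction xs generalizing acc with
  | nil => simp
  | cons x xs ih =>
    rw [List.foldl_cons, ih, List.filter_cons]
    by_cases hx : x = 0 <;> simp [hx]

theorem pvCompactA_eq (xs : List Int) :
    pvCompactA xs
      = xs.filter (fun n => n ≠ 0)
          ++ List.replicate (4 - (xs.filter (fun n => n ≠ 0)).length) 0 := by
  simp only [pvCompactA]
  rw [pvFoldFilter]
  simp

-- core: A's merge-then-recompact on a padded nonzero tile list is B's single pass, padded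
theorem pvMain (ts : List Int) (hlen : ts.length ≤ 4) (hnz : ∀ x ∈ ts, x ≠ 0) :
    pvCompactA (pvMergeStepsA (ts ++ List.replicate (4 - ts.length) 0))
      = pvMergePassB ts ++ List.replicate (4 - (pvMergePassB ts).length) 0 := by
  rcases ts with _ | ⟨a, _ | ⟨b, _ | ⟨c, _ | ⟨d, rest⟩⟩⟩⟩
  · decide
  · have ha : a ≠ 0 := hnz a (by simp)
    simp [pvCompactA_eq, pvMergeStepsA, pvMergePassB, List.replicate, List.filter, ha]
  · have ha : a ≠ 0 := hnz a (by simp)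
    have hb : b ≠ 0 := hnz b (by simp)
    by_cases hab : a = b <;>
      simp [pvCompactA_eq, pvMergeStepsA, pvMergePassB, List.replicate, List.filter,
        ha, hb, hab]
  · have ha : a ≠ 0 := hnz a (by simp)
    have hb : b ≠ 0 := hnz b (by simp)
    have hc : c ≠ 0 := hnz c (by simp)
    by_cases hab : a = b
    · subst hab
      have ha2 : a * 2 ≠ 0 := by omega
      have h0c : ¬((0 : Int) = c) := fun h => hc h.symm
      simp [pvCompactA_eq, pvMergeStepsA, pvMergePassB, List.replicate, List.filter,
        ha, hc, ha2, h0c]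
    · by_cases hbc : b = c
      · subst hbc
        have hb2 : b * 2 ≠ 0 := by omega
        simp [pvCompactA_eq, pvMergeStepsA, pvMergePassB, List.replicate, List.filter,
          ha, hb, hab, hb2]
      · simp [pvCompactA_eq, pvMergeStepsA, pvMergePassB, List.replicate, List.filter,
          ha, hb, hc, hab, hbc]
  · have hr : rest = [] := by
      have hl : rest.length = 0 := by simp at hlen; omega
      exact List.eq_nil_of_length_eq_zero hl
    subst hr
    have ha : a ≠ 0 := hnz a (by simp)
    have hb : b ≠ 0 := hnz b (by simp)
    have hc : c ≠ 0 := hnz c (by simp)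
    have hd : d ≠ 0 := hnz d (by simp)
    by_cases hab : a = b
    · subst hab
      have ha2 : a * 2 ≠ 0 := by omega
      have h0c : ¬((0 : Int) = c) := fun h => hc h.symm
      by_cases hcd : c = d
      · subst hcd
        have hc2 : c * 2 ≠ 0 := by omega
        simp [pvCompactA_eq, pvMergeStepsA, pvMergePassB, List.replicate, List.filter,
          ha, hc, ha2, hc2, h0c]
      · simp [pvCompactA_eq, pvMergeStepsA, pvMergePassB, List.replicate, List.filter,
          ha, hc, hd, ha2, h0c, hcd]
    · by_cases hbc : b = c
      · subst hbc
        have hb2 : b * 2 ≠ 0 := by omega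
        have h0d : ¬((0 : Int) = d) := fun h => hd h.symm
        simp [pvCompactA_eq, pvMergeStepsA, pvMergePassB, List.replicate, List.filter,
          ha, hb, hd, hab, hb2, h0d]
      · by_cases hcd : c = d
        · subst hcd
          have hc2 : c * 2 ≠ 0 := by omega
          simp [pvCompactA_eq, pvMergeStepsA, pvMergePassB, List.replicate, List.filter,
            ha, hb, hc, hab, hbc, hc2]
        · simp [pvCompactA_eq, pvMergeStepsA, pvMergePassB, List.replicate, List.filter,
            ha, hb, hc, hd, hab, hbc, hcd]

-- ===== VERDICT (by name: the statement is the Claim_ definition above) =====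
theorem mergeNoodle_spec : Claim_equal_mergeNoodle := by
  intro n1 n2 n3 n4 _
  unfold Spec_mergeNoodle mergeNoodle mergeNoodle_alt
  rw [pvCompactA_eq [n1, n2, n3, n4]]
  exact pvMain _ (le_trans (List.length_filter_le _ _) (by simp))
    (fun x hx => by simpa using (List.mem_filter.mp hx).2)
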